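-- pv_equiv track=rewrite | github.com/mc-cloud-town/ChatBridgeE | test.py | dcToMcFormatting
-- ===== SOURCE A (Python) =====
-- from typing import Optional
--
-- def dcToMcFormatting(s: str) -> str:
--     legal = ["*", "_", "~"]
--     maxLen: int = len(s) - 1
--
--     result = ""
--     check: bool = False
--
--     asteriskItalic = False  # * 斜體 §o
--     underlineItalic = False  # _ 斜體 §o
--     asteriskBold = False  # **  粗體 §l
--     underlineBold = False  # __  底線 §n
--     strikeThrough = False  # ~~  刪除線 §m
--
--     def checkReset() -> str:
--         if (
--             asteriskItalic
--             and asteriskBold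
--             and underlineItalic
--             and underlineBold
--             and strikeThrough
--         ):
--             return ""
--         return "§r"
--
--     index = 0
--
--     while index <= maxLen:
--         no = s[index]
--         ne: Optional[str] = s[index + 1] if maxLen > index else None  # next
--         index += 1
--
--         if no == "\\":
--             index += 1
--             result += ne or ""
--             continue
--
--         if no == "*" and ne == "*":  # - '**'
--             index += 1
--             result += "§l"
--             continue
--         if no == "_" and ne == "_":  # - '__'
--             index += 1
--             result += "§n"
--             continue
--         if no == "~" and ne == "~":  # - '~~'
--             index += 1
--             result += "§m"
--             continue
--         if no == "_" or no == "*":  # - '_' or '*'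
--             result += "§o"
--             continue
--
--         result += no
--
--     return result
-- ===== SOURCE B (Python) =====
-- import re
--
-- _PAT = re.compile(r'\\([\s\S]?)|\*\*|__|~~|[*_]')
-- _MAP = {'**': '\u00a7l', '__': '\u00a7n', '~~': '\u00a7m'}
--
--
-- def _repl(m):
--     g = m.group(1)
--     if g is not None:           # backslash escape: keep the escaped char ('' for a trailing '\')
--         return g
--     return _MAP.get(m.group(0), '\u00a7o')
--
--
-- def dcToMcFormatting(s: str) -> str:
--     return _PAT.sub(_repl, s)
-- ===== Notes on version B (the rewrite author's own statement) =====
-- stated objective: faster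
-- what changed: Replaces the hand-rolled index/lookahead while-loop with repeated string concatenation (and its dead legal/checkReset code) by one compiled regex of ordered alternatives (escape, '**', '__', '~~', single '*'/'_') and a replacement function dispatching on the matched group, letting re.sub build the output in one pass.
import Mathlib
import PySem

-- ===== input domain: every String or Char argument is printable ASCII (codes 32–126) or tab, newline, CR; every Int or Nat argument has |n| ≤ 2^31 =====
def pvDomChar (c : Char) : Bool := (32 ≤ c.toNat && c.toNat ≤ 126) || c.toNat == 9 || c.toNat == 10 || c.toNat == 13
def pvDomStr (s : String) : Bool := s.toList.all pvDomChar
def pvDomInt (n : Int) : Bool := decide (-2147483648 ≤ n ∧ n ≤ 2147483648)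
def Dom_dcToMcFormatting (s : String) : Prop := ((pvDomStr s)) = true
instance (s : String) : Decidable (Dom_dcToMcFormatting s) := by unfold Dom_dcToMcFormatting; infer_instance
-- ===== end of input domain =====

-- B replaces A's hand-rolled index loop (with its quadratic `result +=` string building) by one
-- compiled regex with ordered alternatives and a dispatching replacement function; the timing
-- run measured B faster on large inputs.

-- ===== PORT A =====
-- A's while-loop over the index, with the accumulator `result`; `ne` is s[index+1] when it
-- exists (Python: `s[index + 1] if maxLen > index else None`), else none; `ne or ""` is
-- `ne.toList` since every character is a non-empty one-char string (never falsy).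
def dcToMcLoopA (cs : List Char) (index : Nat) (result : List Char) : List Char :=
  if h : index < cs.length then
    let no := cs[index]
    let ne : Option Char := cs[index + 1]?
    if no = '\\' then
      dcToMcLoopA cs (index + 2) (result ++ ne.toList)
    else if no = '*' ∧ ne = some '*' then
      dcToMcLoopA cs (index + 2) (result ++ ['§', 'l'])
    else if no = '_' ∧ ne = some '_' then
      dcToMcLoopA cs (index + 2) (result ++ ['§', 'n'])
    else if no = '~' ∧ ne = some '~' then
      dcToMcLoopA cs (index + 2) (result ++ ['§', 'm'])
    else if no = '_' ∨ no = '*' then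
      dcToMcLoopA cs (index + 1) (result ++ ['§', 'o'])
    else
      dcToMcLoopA cs (index + 1) (result ++ [no])
  else result
termination_by cs.length - index

def dcToMcFormatting (s : String) : String :=
  String.ofList (dcToMcLoopA s.toList 0 [])

-- ===== PORT B =====
-- Hand port of re.sub with the pattern r'\\([\s\S]?)|\*\*|__|~~|[*_]': at each position the
-- leftmost-first scan tries the alternatives in order (backslash + optional any char, '**',
-- '__', '~~', single '*'/'_'), emits the replacement _repl returns, and copies a non-matching
-- character through; exact for this pattern since no alternative can start mid-match.
def dcToMcScanB : List Char → List Char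
  | [] => []
  | ['\\'] => []                                          -- group 1 matched '' → _repl returns ''
  | '\\' :: d :: rest => d :: dcToMcScanB rest            -- group 1 = the escaped char
  | '*' :: '*' :: rest => '§' :: 'l' :: dcToMcScanB rest
  | '_' :: '_' :: rest => '§' :: 'n' :: dcToMcScanB rest
  | '~' :: '~' :: rest => '§' :: 'm' :: dcToMcScanB rest
  | '*' :: rest => '§' :: 'o' :: dcToMcScanB rest
  | '_' :: rest => '§' :: 'o' :: dcToMcScanB rest
  | c :: rest => c :: dcToMcScanB rest

def dcToMcFormatting_alt (s : String) : String :=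
  String.ofList (dcToMcScanB s.toList)

-- ===== PRECONDITION & SPEC =====
def Spec_dcToMcFormatting (s : String) (out : String) : Prop := out = dcToMcFormatting_alt s
instance (s : String) (out : String) : Decidable (Spec_dcToMcFormatting s out) := by unfold Spec_dcToMcFormatting; infer_instance

-- ===== CLAIM (what is proved, stated in full; the proofs are below) =====
def Claim_equal_dcToMcFormatting : Prop := ∀ (s : String), Dom_dcToMcFormatting s → Spec_dcToMcFormatting s (dcToMcFormatting s)

-- ===== LEMMAS AND PROOFS =====
-- the two views of the tail: a lookahead character exists, or index+1 is past the end
theorem drop_succ_cases (cs : List Char) (index : Nat) :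
    (∃ c, cs[index+1]? = some c ∧ cs.drop (index+1) = c :: cs.drop (index+2)) ∨
    (cs.length ≤ index + 1 ∧ cs[index+1]? = none ∧ cs.drop (index+1) = []) := by
  rcases Nat.lt_or_ge (index+1) cs.length with h | h
  · exact Or.inl ⟨cs[index+1], List.getElem?_eq_getElem h, List.drop_eq_getElem_cons h⟩
  · exact Or.inr ⟨h, List.getElem?_eq_none h, List.drop_eq_nil_of_le h⟩

theorem dcToMcLoopA_eq_scanB (cs : List Char) (index : Nat) (result : List Char) :
    dcToMcLoopA cs index result = result ++ dcToMcScanB (cs.drop index) := by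
  fun_induction dcToMcLoopA cs index result with
  | case1 index result h no ne hno ih =>
    have hnov : no = cs[index]'h := rfl
    have hnev : ne = cs[index+1]? := rfl
    clear_value no ne
    subst hnov hnev
    rw [ih, List.drop_eq_getElem_cons h]
    rcases drop_succ_cases cs index with ⟨c, he, hd⟩ | ⟨hl, he, hd⟩
    · simp [hno, hd, he, dcToMcScanB]
    · have h2 : cs.drop (index+2) = [] := List.drop_eq_nil_of_le (by omega)
      simp [hno, hd, he, h2, dcToMcScanB]
  | case2 index result h no ne h1 h2 ih =>
    have hnov : no = cs[index]'h := rfl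
    have hnev : ne = cs[index+1]? := rfl
    clear_value no ne
    subst hnov hnev
    rw [ih, List.drop_eq_getElem_cons h]
    rcases drop_succ_cases cs index with ⟨c, he, hd⟩ | ⟨hl, he, hd⟩
    · rw [he] at h2; simp_all [dcToMcScanB]
    · rw [he] at h2; simp_all
  | case3 index result h no ne h1 h2 h3 ih =>
    have hnov : no = cs[index]'h := rfl
    have hnev : ne = cs[index+1]? := rfl
    clear_value no ne
    subst hnov hnev
    rw [ih, List.drop_eq_getElem_cons h]
    rcases drop_succ_cases cs index with ⟨c, he, hd⟩ | ⟨hl, he, hd⟩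
    · rw [he] at h3; simp_all [dcToMcScanB]
    · rw [he] at h3; simp_all
  | case4 index result h no ne h1 h2 h3 h4 ih =>
    have hnov : no = cs[index]'h := rfl
    have hnev : ne = cs[index+1]? := rfl
    clear_value no ne
    subst hnov hnev
    rw [ih, List.drop_eq_getElem_cons h]
    rcases drop_succ_cases cs index with ⟨c, he, hd⟩ | ⟨hl, he, hd⟩
    · rw [he] at h4; simp_all [dcToMcScanB]
    · rw [he] at h4; simp_all
  | case5 index result h no ne h1 h2 h3 h4 h5 ih =>
    have hnov : no = cs[index]'h := rfl
    have hnev : ne = cs[index+1]? := rfl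
    clear_value no ne
    subst hnov hnev
    rw [ih, List.drop_eq_getElem_cons h]
    rcases drop_succ_cases cs index with ⟨c, he, hd⟩ | ⟨hl, he, hd⟩ <;>
      rw [he] at h2 h3 <;> rw [hd] <;>
      rcases h5 with h5 | h5 <;>
      simp_all [dcToMcScanB]
  | case6 index result h no ne h1 h2 h3 h4 h5 ih =>
    have hnov : no = cs[index]'h := rfl
    have hnev : ne = cs[index+1]? := rfl
    clear_value no ne
    subst hnov hnev
    rw [ih, List.drop_eq_getElem_cons h]
    rcases drop_succ_cases cs index with ⟨c, he, hd⟩ | ⟨hl, he, hd⟩ <;>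
      rw [he] at h4 <;> rw [hd] <;>
      simp_all [dcToMcScanB]
  | case7 index result h =>
    simp [List.drop_eq_nil_of_le (Nat.le_of_not_lt h), dcToMcScanB]

-- ===== VERDICT (by name: the statement is the Claim_ definition above) =====
theorem dcToMcFormatting_spec : Claim_equal_dcToMcFormatting := by
  intro s _
  unfold Spec_dcToMcFormatting dcToMcFormatting dcToMcFormatting_alt
  rw [dcToMcLoopA_eq_scanB]
  simp
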